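-- pv_equiv track=rewrite | github.com/JoeWrieden/AdventOfCode | Day12/day12_pt2.py | calculateGravity
-- ===== SOURCE A (Python) =====
-- def calculateGravity(planets, axis):
--     for planet in planets:
--         for other in planets:
--             if planet != other:
--                 if planet[0][axis] > other[0][axis]:
--                     planet[1][axis] -=1
--                 elif planet[0][axis] < other[0][axis]:
--                     planet[1][axis] += 1
--     return planets
-- ===== SOURCE B (Python) =====
-- def calculateGravity(planets, axis):
--     # Like A, mutates the velocity lists in place and returns planets.
--     xs = [p[0][axis] for p in planets]
--     n = len(xs)
--     cnt = {}
--     for x in xs: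
--         cnt[x] = cnt.get(x, 0) + 1
--     less = {}
--     acc = 0
--     for v in sorted(cnt):
--         less[v] = acc
--         acc += cnt[v]
--     for p, x in zip(planets, xs):
--         below = less[x]
--         above = n - below - cnt[x]
--         p[1][axis] += above - below
--     return planets
-- ===== Notes on version B (the rewrite author's own statement) =====
-- stated objective: alternative
-- what changed: A's pairwise double loop (with mutation-sensitive inequality guards) is replaced by one pass collecting each planet's axis position, a value->count dict, a prefix-sum over the sorted distinct values giving #smaller per value, and a single pass applying velocity delta = #greater - #smaller.
-- outside the precondition, e.g. on calculateGravity([[[], []]], 0): A returns [[[], []]], B raises IndexError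
import Mathlib
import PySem

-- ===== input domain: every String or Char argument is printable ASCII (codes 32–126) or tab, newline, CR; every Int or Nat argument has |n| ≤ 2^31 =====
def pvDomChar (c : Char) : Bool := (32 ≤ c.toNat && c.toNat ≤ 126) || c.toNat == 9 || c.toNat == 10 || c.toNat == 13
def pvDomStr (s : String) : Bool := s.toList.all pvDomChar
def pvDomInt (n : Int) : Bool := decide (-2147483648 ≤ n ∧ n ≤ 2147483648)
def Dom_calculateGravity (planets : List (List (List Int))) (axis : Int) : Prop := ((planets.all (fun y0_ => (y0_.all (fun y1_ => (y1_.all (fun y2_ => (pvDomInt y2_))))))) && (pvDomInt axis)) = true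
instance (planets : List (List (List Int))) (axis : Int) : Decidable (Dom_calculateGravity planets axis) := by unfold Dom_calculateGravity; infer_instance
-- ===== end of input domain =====

-- B replaces A's O(n^2) pairwise double loop by a counter dict + prefix sums over the
-- sorted distinct axis positions (velocity delta = #greater - #smaller), O(n log n).
-- Both Pythons mutate the velocity lists of `planets` in place and return `planets`;
-- the equivalence proved here is about the return value.

-- B replaces A's pairwise double loop by a counter dict plus prefix sums over the sorted
-- distinct axis positions (velocity delta = #greater - #smaller).
-- Both Pythons mutate the velocity lists of `planets` in place and return `planets`;
-- the equivalence proved here is about the return value.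

-- ===== PORT A =====
-- shared subscript helpers: Python l[i] (negative wrap); default value where Python raises (excluded by Pre_)
def pg1 (l : List Int) (i : Int) : Int := (PySem.List.pyGet? l i).getD 0
def pg2 (l : List (List Int)) (i : Int) : List Int := (PySem.List.pyGet? l i).getD []

-- planet[1][axis] += d, in place (identity where Python would raise, excluded by Pre_)
def bumpAt (l : List Int) (i : Int) (d : Int) : List Int :=
  l.set (if i < 0 then i + l.length else i).toNat
    (l.getD (if i < 0 then i + l.length else i).toNat 0 + d)

def setVel (p : List (List Int)) (axis d : Int) : List (List Int) :=
  p.set 1 (bumpAt (p.getD 1 []) axis d)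

-- the body of A's inner loop, for the pair (planets[i], planets[j]) on the current state
def innerStep (axis : Int) (i : Nat) (st : List (List (List Int))) (j : Nat) : List (List (List Int)) :=
  if st.getD i [] ≠ st.getD j [] then
    if pg1 (pg2 (st.getD i []) 0) axis > pg1 (pg2 (st.getD j []) 0) axis then
      st.set i (setVel (st.getD i []) axis (-1))
    else if pg1 (pg2 (st.getD i []) 0) axis < pg1 (pg2 (st.getD j []) 0) axis then
      st.set i (setVel (st.getD i []) axis 1)
    else st
  else st

def calculateGravity (planets : List (List (List Int))) (axis : Int) : List (List (List Int)) :=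
  (List.range planets.length).foldl
    (fun st i => (List.range planets.length).foldl (innerStep axis i) st) planets

-- ===== PORT B =====
def calculateGravity_alt (planets : List (List (List Int))) (axis : Int) : List (List (List Int)) :=
  let xs := planets.map (fun p => pg1 (pg2 p 0) axis)
  let n : Int := xs.length
  let cnt : PySem.Dict Int Int := xs.foldl (fun d x => d.insert x (d.getD x 0 + 1)) PySem.Dict.empty
  let lessAcc : PySem.Dict Int Int × Int :=
    (PySem.List.sorted cnt.keys (fun v => v) false).foldl
      (fun s v => (s.1.insert v s.2, s.2 + cnt.getD v 0)) (PySem.Dict.empty, 0)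
  (planets.zip xs).map (fun px =>
    let below := lessAcc.1.getD px.2 0
    let above := n - below - cnt.getD px.2 0
    setVel px.1 axis (above - below))

-- ===== PRECONDITION & SPEC =====
-- Pre_ excludes inputs where some planet lacks a position/velocity entry at index axis (or has
-- fewer than 2 components): B always raises IndexError there, while A raises except in the
-- degenerate cases (a single planet, or all planets pairwise equal) where it never reaches the
-- faulty subscript and returns the input unchanged.
def Pre_calculateGravity (planets : List (List (List Int))) (axis : Int) : Prop :=
  ∀ p ∈ planets, 2 ≤ p.length ∧ PySem.Raise.InRange (pg2 p 0).length axis ∧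
    PySem.Raise.InRange (pg2 p 1).length axis
instance (planets : List (List (List Int))) (axis : Int) : Decidable (Pre_calculateGravity planets axis) := by unfold Pre_calculateGravity; infer_instance

def pvWitness_calculateGravity : List (List (List Int)) × Int :=
  ([[[3, 0], [0, 0]], [[1, 2], [5, -1]], [[1, 7], [0, 0]]], 0)

def Spec_calculateGravity (planets : List (List (List Int))) (axis : Int) (out : List (List (List Int))) : Prop := out = calculateGravity_alt planets axis
instance (planets : List (List (List Int))) (axis : Int) (out : List (List (List Int))) : Decidable (Spec_calculateGravity planets axis out) := by unfold Spec_calculateGravity; infer_instance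

-- ===== CLAIM (what is proved, stated in full; the proofs are below) =====
def Claim_equal_calculateGravity : Prop := ∀ (planets : List (List (List Int))) (axis : Int), Dom_calculateGravity planets axis → Pre_calculateGravity planets axis → Spec_calculateGravity planets axis (calculateGravity planets axis)

-- ===== LEMMAS AND PROOFS =====

-- the axis position of a planet, one pairwise velocity contribution, and the common
-- normal form (each planet's velocity bumped by #greater - #smaller) both ports reduce to
def posOf (axis : Int) (p : List (List Int)) : Int := pg1 (pg2 p 0) axis
def contrib (a b : Int) : Int := if a > b then -1 else if a < b then 1 else 0
def deltaOf (xs : List Int) (x : Int) : Int :=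
  (xs.countP (fun y => decide (x < y)) : Int) - (xs.countP (fun y => decide (y < x)) : Int)
def applyG (axis : Int) (xs : List Int) (p : List (List Int)) : List (List Int) :=
  setVel p axis (deltaOf xs (posOf axis p))

theorem sgd {α : Type} (l : List α) (j : Nat) (d : α) : l.set j (l.getD j d) = l := by
  by_cases h : j < l.length
  · rw [List.getD_eq_getElem l d h]; exact List.set_getElem_self h
  · exact List.set_eq_of_length_le (le_of_not_gt h)

theorem gds {α : Type} (l : List α) (i : Nat) (h : i < l.length) (v d : α): (l.set i v).getD i d = v := by
  simp [List.getD, List.getElem?_set_self h]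

theorem gds_ne {α : Type} (l : List α) (i j : Nat) (h : j ≠ i) (v d : α): (l.set i v).getD j d = l.getD j d := by
  simp [List.getD, List.getElem?_set_ne h.symm]

theorem bumpAt_zero (l : List Int) (i : Int) : bumpAt l i 0 = l := by
  simp only [bumpAt, add_zero]; exact sgd l _ 0

theorem bumpAt_bumpAt (l : List Int) (i d1 d2 : Int) :
    bumpAt (bumpAt l i d1) i d2 = bumpAt l i (d1 + d2) := by
  simp only [bumpAt, List.length_set]
  by_cases h : (if i < 0 then i + ↑l.length else i).toNat < l.length
  · rw [gds _ _ h, List.set_set]; ring_nf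
  · rw [List.set_eq_of_length_le (le_of_not_gt h), List.set_eq_of_length_le (le_of_not_gt h),
        List.set_eq_of_length_le (le_of_not_gt h)]

theorem setVel_zero (p : List (List Int)) (a : Int) : setVel p a 0 = p := by
  simp only [setVel, bumpAt_zero]; exact sgd p 1 []

theorem setVel_setVel (p : List (List Int)) (a d1 d2 : Int) :
    setVel (setVel p a d1) a d2 = setVel p a (d1 + d2) := by
  match p with
  | [] => rfl
  | [x] => rfl
  | x :: y :: t => simp [setVel, List.set, bumpAt_bumpAt]

theorem posOf_setVel (axis : Int) (p : List (List Int)) (a d : Int) :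
    posOf axis (setVel p a d) = posOf axis p := by
  match p with
  | [] => rfl
  | [x] => rfl
  | x :: y :: t => simp [posOf, setVel, List.set, pg2, pysem]

theorem innerStep_eq (axis : Int) (i : Nat) (st : List (List (List Int))) (j : Nat) :
    innerStep axis i st j
      = st.set i (setVel (st.getD i []) axis
          (contrib (posOf axis (st.getD i [])) (posOf axis (st.getD j [])))) := by
  by_cases heq : st.getD i [] = st.getD j []
  · have hc : contrib (posOf axis (st.getD i [])) (posOf axis (st.getD j [])) = 0 := by
      rw [heq]; simp [contrib]
    rw [hc, setVel_zero, sgd]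
    simp only [innerStep]
    rw [if_neg (not_not_intro heq)]
  · simp only [innerStep]
    rw [if_pos heq]
    by_cases h1 : pg1 (pg2 (st.getD i []) 0) axis > pg1 (pg2 (st.getD j []) 0) axis
    · rw [if_pos h1]
      have hc : contrib (posOf axis (st.getD i [])) (posOf axis (st.getD j [])) = -1 := by
        unfold contrib posOf; rw [if_pos h1]
      rw [hc]
    · rw [if_neg h1]
      by_cases h2 : pg1 (pg2 (st.getD i []) 0) axis < pg1 (pg2 (st.getD j []) 0) axis
      · rw [if_pos h2]
        have hc : contrib (posOf axis (st.getD i [])) (posOf axis (st.getD j [])) = 1 := by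
          unfold contrib posOf; rw [if_neg h1, if_pos h2]
        rw [hc]
      · rw [if_neg h2]
        have hc : contrib (posOf axis (st.getD i [])) (posOf axis (st.getD j [])) = 0 := by
          unfold contrib posOf; rw [if_neg h1, if_neg h2]
        rw [hc, setVel_zero, sgd]

theorem inner_fold (axis : Int) (i : Nat) (js : List Nat) (st : List (List (List Int))) :
    js.foldl (innerStep axis i) st
      = st.set i (setVel (st.getD i []) axis
          ((js.map (fun j => contrib (posOf axis (st.getD i [])) (posOf axis (st.getD j [])))).sum)) := by
  induction js generalizing st with
  | nil => simp only [List.foldl_nil, List.map_nil, List.sum_nil]; rw [setVel_zero, sgd]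
  | cons j js ih =>
    rw [List.foldl_cons, innerStep_eq]
    by_cases hi : i < st.length
    · rw [ih]
      have h1 : (st.set i (setVel (st.getD i []) axis
          (contrib (posOf axis (st.getD i [])) (posOf axis (st.getD j []))))).getD i []
          = setVel (st.getD i []) axis
          (contrib (posOf axis (st.getD i [])) (posOf axis (st.getD j []))) := gds _ _ hi _ _
      have h2 : ∀ j' : Nat, posOf axis ((st.set i (setVel (st.getD i []) axis
          (contrib (posOf axis (st.getD i [])) (posOf axis (st.getD j []))))).getD j' [])
          = posOf axis (st.getD j' []) := by
        intro j'
        by_cases hj : j' = i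
        · subst hj; rw [h1, posOf_setVel]
        · rw [gds_ne _ _ _ hj]
      simp only [h1, h2, posOf_setVel, List.set_set, setVel_setVel]
      rw [List.map_cons, List.sum_cons]
    · have hst : ∀ v, st.set i v = st := fun v => List.set_eq_of_length_le (le_of_not_gt hi)
      rw [hst, ih, hst, hst]

theorem sum_contrib (xs : List Int) (x : Int) : (xs.map (contrib x)).sum = deltaOf xs x := by
  induction xs with
  | nil => simp [deltaOf]
  | cons y t ih =>
    simp only [List.map_cons, List.sum_cons, ih, deltaOf, List.countP_cons, contrib]
    split_ifs with h1 h2 <;> push_cast <;> simp_all <;> omega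

theorem map_range_getD {α β : Type} (l : List α) (d : α) (g : α → β) :
    (List.range l.length).map (fun j => g (l.getD j d)) = l.map g := by
  apply List.ext_getElem (by simp)
  intro i h1 h2
  simp only [List.getElem_map, List.getElem_range]
  rw [List.getD_eq_getElem _ _ (by simpa using h2)]

theorem outer_aux (planets : List (List (List Int))) (axis : Int) (k : Nat) (hk : k ≤ planets.length) :
    (List.range k).foldl
        (fun st i => (List.range planets.length).foldl (innerStep axis i) st) planets
      = (planets.take k).map (applyG axis (planets.map (posOf axis))) ++ planets.drop k := by
  induction k with
  | zero => simp
  | succ k ih =>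
    have hk' : k < planets.length := hk
    rw [List.range_succ, List.foldl_append, ih (le_of_lt hk'), List.foldl_cons, List.foldl_nil]
    set F := applyG axis (planets.map (posOf axis)) with hF
    set st := (planets.take k).map F ++ planets.drop k with hst
    have hlen : st.length = planets.length := by
      simp [hst, List.length_take, Nat.min_eq_left (le_of_lt hk')]
      omega
    have hmap : st.map (posOf axis) = planets.map (posOf axis) := by
      rw [hst, List.map_append, List.map_map]
      have : posOf axis ∘ F = posOf axis := by
        funext p; simp [Function.comp, hF, applyG, posOf_setVel]
      rw [this, ← List.map_append, List.take_append_drop]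
    have hlen1 : ((planets.take k).map F).length = k := by
      simp [List.length_take]; omega
    have hgetk : st.getD k [] = planets[k] := by
      rw [hst]
      rw [List.getD_eq_getElem _ _ (by simp [List.length_take]; omega)]
      rw [List.getElem_append_right hlen1.le]
      simp only [hlen1, Nat.sub_self, List.getElem_drop]
      simp
    rw [inner_fold]
    rw [← hlen, map_range_getD st [] (fun p => contrib (posOf axis (st.getD k [])) (posOf axis p))]
    have hmap2 : st.map (fun p => contrib (posOf axis (st.getD k [])) (posOf axis p))
        = (planets.map (posOf axis)).map (contrib (posOf axis (st.getD k []))) := by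
      rw [← hmap, List.map_map]; rfl
    rw [hmap2, sum_contrib, hgetk]
    have hset : st.set k (setVel planets[k] axis (deltaOf (planets.map (posOf axis)) (posOf axis planets[k])))
        = (planets.take (k+1)).map F ++ planets.drop (k+1) := by
      rw [hst, List.set_append_right k _ hlen1.le, hlen1, Nat.sub_self]
      rw [List.drop_eq_getElem_cons hk', List.set_cons_zero]
      rw [List.take_add_one, List.map_append, List.getElem?_eq_getElem hk']
      simp [hF, applyG]
    rw [hset]

theorem A_normal (planets : List (List (List Int))) (axis : Int) :
    calculateGravity planets axis = planets.map (applyG axis (planets.map (posOf axis))) := by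
  rw [calculateGravity, outer_aux planets axis planets.length (le_refl _)]
  simp

theorem count_partition (xs : List Int) (x : Int) :
    xs.countP (fun y => decide (y < x)) + xs.count x + xs.countP (fun y => decide (x < y)) = xs.length := by
  rw [List.count_eq_countP]
  induction xs with
  | nil => simp
  | cons y t ih =>
    simp only [List.countP_cons, List.length_cons]
    rcases lt_trichotomy y x with h | h | h
    · have d1 : decide (y < x) = true := by simp [h]
      have d2 : decide (x < y) = false := by simp; omega
      have d3 : (y == x) = false := by simp; omega
      simp only [d1, d2, d3, Bool.false_eq_true, if_true, if_false]
      omega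
    · have d1 : decide (y < x) = false := by simp; omega
      have d2 : decide (x < y) = false := by simp; omega
      have d3 : (y == x) = true := by simp [h]
      simp only [d1, d2, d3, Bool.false_eq_true, if_true, if_false]
      omega
    · have d1 : decide (y < x) = false := by simp; omega
      have d2 : decide (x < y) = true := by simp [h]
      have d3 : (y == x) = false := by simp; omega
      simp only [d1, d2, d3, Bool.false_eq_true, if_true, if_false]
      omega

theorem fold_less_get?_not_mem (f : Int → Int) (ks : List Int) (d0 : PySem.Dict Int Int)
    (a0 : Int) (x : Int) (hx : x ∉ ks) :
    ((ks.foldl (fun (s : PySem.Dict Int Int × Int) v => (s.1.insert v s.2, s.2 + f v)) (d0, a0)).1).get? x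
      = d0.get? x := by
  induction ks generalizing d0 a0 with
  | nil => rfl
  | cons v t ih =>
    rw [List.foldl_cons, ih _ _ (fun h => hx (List.mem_cons_of_mem _ h))]
    exact PySem.Dict.get?_insert_of_ne d0 a0 (fun h => hx (h ▸ List.mem_cons_self))

theorem foldl_less_getD (f : Int → Int) (ks : List Int) (d0 : PySem.Dict Int Int) (a0 : Int)
    (h : List.Pairwise (· < ·) ks) (x : Int) (hx : x ∈ ks) :
    ((ks.foldl (fun (s : PySem.Dict Int Int × Int) v => (s.1.insert v s.2, s.2 + f v)) (d0, a0)).1).getD x 0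
      = a0 + ((ks.filter (fun v => decide (v < x))).map f).sum := by
  induction ks generalizing d0 a0 with
  | nil => exact absurd hx (List.not_mem_nil)
  | cons v t ih =>
    rw [List.foldl_cons]
    rcases List.pairwise_cons.mp h with ⟨hv, ht⟩
    rcases List.mem_cons.mp hx with rfl | hxt
    · have hnot : x ∉ t := fun hmem => absurd (hv x hmem) (lt_irrefl x)
      have hget := fold_less_get?_not_mem f t (d0.insert x a0) (a0 + f x) x hnot
      have hfil : (x :: t).filter (fun v => decide (v < x)) = [] := by
        rw [List.filter_eq_nil_iff]
        intro a ha
        simp only [decide_eq_true_eq]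
        rcases List.mem_cons.mp ha with rfl | hat
        · exact lt_irrefl a
        · exact not_lt.mpr (le_of_lt (hv a hat))
      rw [hfil]
      simp only [List.map_nil, List.sum_nil, add_zero]
      have hgd : (List.foldl (fun (s : PySem.Dict ℤ ℤ × ℤ) v => (s.1.insert v s.2, s.2 + f v)) (d0.insert x a0, a0 + f x) t).1.getD x 0
          = ((List.foldl (fun (s : PySem.Dict ℤ ℤ × ℤ) v => (s.1.insert v s.2, s.2 + f v)) (d0.insert x a0, a0 + f x) t).1.get? x).getD 0 := rfl
      rw [hgd, hget, PySem.Dict.get?_insert_self, Option.getD_some]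
    · have hvx : v < x := hv x hxt
      rw [ih (d0.insert v a0) (a0 + f v) ht hxt]
      have hfc : (v :: t).filter (fun w => decide (w < x)) = v :: t.filter (fun w => decide (w < x)) := by
        rw [List.filter_cons_of_pos (by simp [hvx])]
      rw [hfc, List.map_cons, List.sum_cons]
      ring

theorem B_below (xs : List Int) (x : Int) (hx : x ∈ xs) :
    ((PySem.List.sorted (PySem.Set.ofList xs) (fun v => v) false).foldl
        (fun (s : PySem.Dict Int Int × Int) v => (s.1.insert v s.2, s.2 + (PySem.Dict.counter xs).getD v 0))
        (PySem.Dict.empty, 0)).1.getD x 0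
      = (xs.countP (fun y => decide (y < x)) : Int) := by
  have hperm : (PySem.List.sorted (PySem.Set.ofList xs) (fun v => v) false).Perm (PySem.Set.ofList xs) :=
    PySem.List.sorted_perm _ _ _
  have hnd : (PySem.List.sorted (PySem.Set.ofList xs) (fun v => v) false).Nodup :=
    hperm.nodup_iff.mpr (PySem.Set.nodup_ofList xs)
  have hple : List.Pairwise (fun a b => a ≤ b) (PySem.List.sorted (PySem.Set.ofList xs) (fun v => v) false) :=
    PySem.List.sorted_pairwise (PySem.Set.ofList xs) (fun v => v)
  have hplt : List.Pairwise (· < ·) (PySem.List.sorted (PySem.Set.ofList xs) (fun v => v) false) :=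
    (hple.and hnd).imp fun hab => lt_of_le_of_ne hab.1 hab.2
  have hmemks : x ∈ PySem.List.sorted (PySem.Set.ofList xs) (fun v => v) false :=
    hperm.mem_iff.mpr ((PySem.Set.mem_ofList xs x).mpr hx)
  rw [foldl_less_getD _ _ _ _ hplt x hmemks, zero_add]
  have hfmap : ((PySem.List.sorted (PySem.Set.ofList xs) (fun v => v) false).filter
        (fun v => decide (v < x))).map (fun v => (PySem.Dict.counter xs).getD v 0)
      = ((PySem.List.sorted (PySem.Set.ofList xs) (fun v => v) false).filter
        (fun v => decide (v < x))).map (fun v => ((List.count v xs : Nat) : Int)) :=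
    List.map_congr_left fun v _ => PySem.Dict.getD_counter xs v
  rw [hfmap]
  have hcast : ∀ (l : List Int), (l.map (fun v => ((List.count v xs : Nat) : Int))).sum
      = ((l.map (fun v => List.count v xs)).sum : Int) := by
    intro l; rw [Nat.cast_list_sum, List.map_map]; rfl
  rw [hcast]
  congr 1
  have hsd : (PySem.Set.ofList xs).Perm xs.dedup :=
    (List.perm_ext_iff_of_nodup (PySem.Set.nodup_ofList xs) (List.nodup_dedup xs)).mpr
      (fun a => by rw [PySem.Set.mem_ofList, List.mem_dedup])
  have hpermf : (((PySem.List.sorted (PySem.Set.ofList xs) (fun v => v) false).filter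
        (fun v => decide (v < x))).map (fun v => List.count v xs)).Perm
      ((xs.dedup.filter (fun v => decide (v < x))).map (fun v => List.count v xs)) :=
    ((hperm.trans hsd).filter _).map _
  rw [hpermf.sum_eq]
  exact List.sum_map_count_dedup_filter_eq_countP _ xs

theorem B_normal (planets : List (List (List Int))) (axis : Int) :
    calculateGravity_alt planets axis = planets.map (applyG axis (planets.map (posOf axis))) := by
  simp only [calculateGravity_alt, PySem.Dict.foldl_insert_getD_add_one_eq_counter,
    PySem.Dict.keys_counter]
  rw [show (fun p => pg1 (pg2 p 0) axis) = posOf axis from rfl,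
    ← List.map_prod_left_eq_zip, List.map_map]
  apply List.map_congr_left
  intro p hp
  have hx : posOf axis p ∈ planets.map (posOf axis) := List.mem_map_of_mem hp
  simp only [Function.comp, applyG]
  congr 1
  rw [B_below (planets.map (posOf axis)) (posOf axis p) hx, PySem.Dict.getD_counter,
    deltaOf, List.count_eq_countP]
  have hpart := count_partition (planets.map (posOf axis)) (posOf axis p)
  rw [List.count_eq_countP] at hpart
  simp only [List.length_map] at *
  omega

-- ===== VERDICT (by name: the statement is the Claim_ definition above) =====
theorem calculateGravity_spec : Claim_equal_calculateGravity := by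
  intro planets axis _ _
  unfold Spec_calculateGravity
  rw [A_normal, B_normal]
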